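-- pv_equiv track=rewrite | github.com/Smallzoo-dev/python-algorithm-study | homework/1011_fly_me_to_the_alpha_centauri.py | solution
-- ===== SOURCE A (Python) =====
-- import math
--
-- def get_left_year_by_max_speed(left_distance, max_speed):
--     year_counter = 0
--     current_left_distance = left_distance
--     while max_speed >= 1:
--         if max_speed > left_distance:
--             max_speed -= 1
--             continue
--         elif current_left_distance % max_speed == 0:
--             year_counter += (current_left_distance // max_speed)
--             break
--         else:
--             year_counter += (current_left_distance // max_speed)
--             current_left_distance = current_left_distance % max_speed
--             max_speed -= 1
--
--     return year_counter
--
-- def get_year_by_distance(distance):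
--     if(distance <= 3):
--         return distance
--     year_counter = 0
--     max_speed = int(math.sqrt(distance))
--     year_counter += 2 * max_speed - 1
--     left_distance = distance - max_speed**2
--     year_counter += get_left_year_by_max_speed(left_distance, max_speed)
--     return year_counter
--
-- def solution(input_array):
--     input_array.pop(0)
--     distance_arr = []
--     solution_arr = []
--     for i in range(0, len(input_array) - 1, 2):
--         distance_arr.append(input_array[i+1] - input_array[i])
--
--     for distance in distance_arr:
--         solution_arr.append(get_year_by_distance(distance))
--     return solution_arr
-- ===== SOURCE B (Python) =====
-- from math import isqrt
--
-- def solution(input_array):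
--     input_array.pop(0)
--     solution_arr = []
--     it = iter(input_array)
--     for x, y in zip(it, it):
--         d = y - x
--         if d <= 3:
--             solution_arr.append(d)
--         else:
--             m = isqrt(d)
--             if d == m * m:
--                 solution_arr.append(2 * m - 1)
--             elif d <= m * m + m:
--                 solution_arr.append(2 * m)
--             else:
--                 solution_arr.append(2 * m + 1)
--     return solution_arr
-- ===== Notes on version B (the rewrite author's own statement) =====
-- stated objective: faster
-- what changed: Replaces the O(sqrt(d)) decrementing-speed greedy loop per query with a closed-form case split on m=isqrt(d) (2m-1 / 2m / 2m+1), and builds distances by pairing the list directly instead of an index range loop.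
-- outside the precondition, e.g. on solution([]): A raises IndexError, B raises IndexError
import Mathlib
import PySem

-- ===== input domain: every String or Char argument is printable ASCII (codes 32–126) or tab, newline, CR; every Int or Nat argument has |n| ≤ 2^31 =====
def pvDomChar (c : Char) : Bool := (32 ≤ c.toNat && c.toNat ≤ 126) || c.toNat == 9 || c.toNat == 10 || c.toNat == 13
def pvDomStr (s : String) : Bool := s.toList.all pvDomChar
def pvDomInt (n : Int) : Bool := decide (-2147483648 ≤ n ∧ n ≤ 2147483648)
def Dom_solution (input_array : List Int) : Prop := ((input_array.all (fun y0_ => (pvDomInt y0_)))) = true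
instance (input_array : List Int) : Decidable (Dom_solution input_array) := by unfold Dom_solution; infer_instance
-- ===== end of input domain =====

-- B replaces A's per-distance decrementing-speed greedy loop by the closed-form case split on
-- m = isqrt(d) (2m-1 / 2m / 2m+1) and pairs the list directly instead of an index-range loop (faster).
-- Both A and B mutate their argument (input_array.pop(0)); the equivalence proved here is about the return value.

-- ===== PORT A =====
-- the while-loop of get_left_year_by_max_speed; structural recursion on max_speed (an int ≥ 0 here),
-- which strictly decreases in both continuing branches
def getLeftYearLoop (leftDistance : Int) : Nat → Int → Int → Int
  | 0, _cur, year => year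
  | s + 1, cur, year =>
    if ((s : Int) + 1) > leftDistance then
      getLeftYearLoop leftDistance s cur year
    else if PySem.Int.mod cur ((s : Int) + 1) = 0 then
      year + PySem.Int.floordiv cur ((s : Int) + 1)
    else
      getLeftYearLoop leftDistance s (PySem.Int.mod cur ((s : Int) + 1))
        (year + PySem.Int.floordiv cur ((s : Int) + 1))

def getLeftYearByMaxSpeed (leftDistance : Int) (maxSpeed : Nat) : Int :=
  getLeftYearLoop leftDistance maxSpeed leftDistance 0

-- int(math.sqrt(distance)) is ported as Nat.sqrt: exact, since on Dom 4 ≤ distance ≤ 2^32,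
-- where the correctly rounded double sqrt truncates to the integer square root
def getYearByDistance (distance : Int) : Int :=
  if distance ≤ 3 then distance
  else
    let maxSpeed : Nat := Nat.sqrt distance.toNat
    let yearCounter : Int := 2 * (maxSpeed : Int) - 1
    let leftDistance : Int := distance - (maxSpeed : Int) ^ 2
    yearCounter + getLeftYearByMaxSpeed leftDistance maxSpeed

def solution (input_array : List Int) : List Int :=
  let arr := input_array.tail   -- input_array.pop(0); Pre_ excludes the empty list, where pop raises
  let distance_arr :=
    (PySem.List.pyRange 0 ((arr.length : Int) - 1) 2).foldl
      (fun acc i => acc ++ [PySem.List.pyGetD arr (i + 1) 0 - PySem.List.pyGetD arr i 0]) []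
  distance_arr.foldl (fun acc d => acc ++ [getYearByDistance d]) []

-- ===== PORT B =====
-- zip(it, it): consecutive disjoint pairs
def altPairs : List Int → List (Int × Int)
  | x :: y :: rest => (x, y) :: altPairs rest
  | _ => []

-- math.isqrt is Nat.sqrt
def altYear (d : Int) : Int :=
  if d ≤ 3 then d
  else
    let m : Int := (Nat.sqrt d.toNat : Int)
    if d = m * m then 2 * m - 1
    else if d ≤ m * m + m then 2 * m
    else 2 * m + 1

def solution_alt (input_array : List Int) : List Int :=
  (altPairs input_array.tail).map (fun p => altYear (p.2 - p.1))

-- ===== PRECONDITION & SPEC =====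
-- Pre_ excludes only the empty list, on which A's input_array.pop(0) raises IndexError (B's pop raises too)
def Pre_solution (input_array : List Int) : Prop := input_array ≠ []
instance (input_array : List Int) : Decidable (Pre_solution input_array) := by
  unfold Pre_solution; infer_instance
def pvWitness_solution : List Int := [1, 0, 4]

def Spec_solution (input_array : List Int) (out : List Int) : Prop := out = solution_alt input_array
instance (input_array : List Int) (out : List Int) : Decidable (Spec_solution input_array out) := by
  unfold Spec_solution; infer_instance

-- ===== CLAIM (what is proved, stated in full; the proofs are below) =====
def Claim_equal_solution : Prop := ∀ (input_array : List Int), Dom_solution input_array → Pre_solution input_array → Spec_solution input_array (solution input_array)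

-- ===== LEMMAS AND PROOFS =====

-- loop invariant: while 1 ≤ current ≤ speed and current ≤ left_distance, the loop adds exactly 1
theorem getLeftYearLoop_one (leftDistance : Int) (s : Nat) :
    ∀ (cur year : Int), 1 ≤ cur → cur ≤ (s : Int) → cur ≤ leftDistance →
      getLeftYearLoop leftDistance s cur year = year + 1 := by
  induction s with
  | zero => intro cur year h1 h2 _; exfalso; omega
  | succ k ih =>
    intro cur year h1 h2 h3
    simp only [getLeftYearLoop]
    split_ifs with hg hm
    · exact ih cur year h1 (by push_cast at h2 hg ⊢; omega) h3
    · -- cur % (k+1) = 0 with 1 ≤ cur ≤ k+1 forces cur = k+1, so cur // (k+1) = 1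
      rw [PySem.Int.mod_eq_emod_of_pos (by positivity)] at hm
      rw [PySem.Int.floordiv_eq_ediv_of_pos (by positivity)]
      have hcur : cur = (k : Int) + 1 := by
        rcases lt_or_eq_of_le h2 with hlt | he
        · exfalso; rw [Int.emod_eq_of_lt (by omega) (by push_cast at hlt ⊢; omega)] at hm; omega
        · exact he
      rw [hcur, Int.ediv_self (by positivity)]
    · -- cur < k+1: cur % (k+1) = cur and cur // (k+1) = 0
      have hlt : cur < (k : Int) + 1 := by
        rcases lt_or_eq_of_le h2 with hlt | he
        · push_cast at hlt ⊢; omega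
        · exfalso; rw [he, PySem.Int.mod_eq_emod_of_pos (by positivity)] at hm
          simp at hm
      rw [PySem.Int.mod_eq_emod_of_pos (by positivity),
          PySem.Int.floordiv_eq_ediv_of_pos (by positivity),
          Int.emod_eq_of_lt (by omega) hlt, Int.ediv_eq_zero_of_lt (by omega) hlt]
      rw [ih cur (year + 0) h1 (by omega) h3]; ring

-- with left_distance = 0 the guard always fires and the loop just counts speed down to 0
theorem getLeftYearLoop_zero (s : Nat) (year : Int) :
    getLeftYearLoop 0 s 0 year = year := by
  induction s with
  | zero => rfl
  | succ k ih =>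
    simp only [getLeftYearLoop]
    rw [if_pos (by positivity)]
    exact ih

-- per-distance: A's greedy loop equals B's closed form, for every Int distance
theorem year_eq (d : Int) : getYearByDistance d = altYear d := by
  by_cases hd : d ≤ 3
  · simp [getYearByDistance, altYear, hd]
  · simp only [getYearByDistance, altYear, getLeftYearByMaxSpeed, if_neg hd]
    generalize hm : Nat.sqrt d.toNat = m
    have hd4 : 4 ≤ d := by omega
    have hdn : ((d.toNat : Int)) = d := Int.toNat_of_nonneg (by omega)
    have hlo : (m : Int) * m ≤ d := by
      have h := Nat.sqrt_le' d.toNat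
      rw [hm, pow_two] at h
      rw [← hdn]
      exact_mod_cast h
    have hhi : d < (m : Int) * m + 2 * m + 1 := by
      have h := Nat.lt_succ_sqrt' d.toNat
      rw [hm, pow_two, Nat.succ_eq_add_one] at h
      have h2 : (d.toNat : Int) < ((m : Int) + 1) * ((m : Int) + 1) := by exact_mod_cast h
      rw [hdn] at h2
      nlinarith
    have hm2 : 2 ≤ (m : Int) := by
      have h := Nat.sqrt_le_sqrt (show 4 ≤ d.toNat by omega)
      rw [hm] at h
      have h4 : Nat.sqrt 4 = 2 := by norm_num
      rw [h4] at h
      exact_mod_cast h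
    generalize hL : d - (m : Int) ^ 2 = L
    have hLd : d = L + (m : Int) * m := by rw [← hL]; ring
    have hL0 : 0 ≤ L := by linarith
    have hL2 : L ≤ 2 * (m : Int) := by linarith
    rcases eq_or_lt_of_le hL0 with h0 | hpos
    · -- L = 0 : answer 2m-1
      rw [← h0, getLeftYearLoop_zero, if_pos (by linarith : d = (m : Int) * m)]
      ring
    · by_cases hle : L ≤ (m : Int)
      · -- 1 ≤ L ≤ m : answer 2m
        rw [getLeftYearLoop_one L m L 0 (by linarith) hle (le_refl L)]
        rw [if_neg (by intro h; linarith), if_pos (by linarith)]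
        ring
      · -- m < L ≤ 2m : answer 2m+1
        have hgt : (m : Int) < L := not_le.mp hle
        rcases m with _ | k
        · exact absurd hm2 (by norm_num)
        · push_cast at hgt hL2 hLd hL0 hm2 ⊢
          simp only [getLeftYearLoop]
          rw [if_neg (by omega : ¬((k : Int) + 1 > L))]
          rw [PySem.Int.mod_eq_emod_of_pos (by omega : (0:Int) < (k : Int) + 1),
              PySem.Int.floordiv_eq_ediv_of_pos (by omega : (0:Int) < (k : Int) + 1)]
          rcases eq_or_lt_of_le hL2 with h2m | hlt2m
          · -- L = 2m : one division step finishes the loop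
            rw [h2m]
            have hmod0 : (2 * ((k : Int) + 1)) % ((k : Int) + 1) = 0 := by
              simp [Int.mul_emod_left]
            have hdiv2 : (2 * ((k : Int) + 1)) / ((k : Int) + 1) = 2 :=
              Int.mul_ediv_cancel 2 (by omega)
            rw [if_pos hmod0, hdiv2]
            rw [if_neg (by intro h; nlinarith), if_neg (by nlinarith)]
            ring
          · -- m < L < 2m : one step, then the invariant adds the final 1
            have hmod : L % ((k : Int) + 1) = L - ((k : Int) + 1) := by
              conv_lhs => rw [← Int.sub_emod_right L ((k : Int) + 1)]
              exact Int.emod_eq_of_lt (by omega) (by omega)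
            have hdiv : L / ((k : Int) + 1) = 1 := by
              conv_lhs => rw [show L = (L - ((k : Int) + 1)) + 1 * ((k : Int) + 1) by ring]
              rw [Int.add_mul_ediv_right _ _ (by omega : ((k : Int) + 1) ≠ 0),
                  Int.ediv_eq_zero_of_lt (by omega) (by omega)]
              norm_num
            rw [hmod, hdiv]
            rw [if_neg (by omega : ¬(L - ((k : Int) + 1) = 0))]
            rw [getLeftYearLoop_one L k (L - ((k : Int) + 1)) (0 + 1)
                  (by omega) (by omega) (by omega)]
            rw [if_neg (by intro h; nlinarith), if_neg (by nlinarith)]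
            ring

-- peeling one index off range(0, b, 2)
theorem pyRange_two_cons (b : Int) (hb : 1 ≤ b) :
    PySem.List.pyRange 0 b 2 = 0 :: (PySem.List.pyRange 0 (b - 2) 2).map (· + 2) := by
  rw [PySem.List.pyRange_of_pos 0 b (by norm_num),
      PySem.List.pyRange_of_pos 0 (b - 2) (by norm_num)]
  rw [if_pos (by omega : (0:Int) < b)]
  by_cases h2 : (0:Int) < b - 2
  · rw [if_pos h2,
        show ((b - 0 + 2 - 1) / 2).toNat = ((b - 2 - 0 + 2 - 1) / 2).toNat + 1 by omega,
        List.range_succ_eq_map]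
    simp only [List.map_cons, List.map_map]
    refine List.cons_eq_cons.mpr ⟨by norm_num, ?_⟩
    apply List.map_congr_left
    intro k _
    simp only [Function.comp_apply]
    push_cast
    ring
  · rw [if_neg h2, show ((b - 0 + 2 - 1) / 2).toNat = 1 by omega]
    simp [List.range_succ]

-- the index-range distance loop produces exactly the differences of the disjoint pairs
theorem dist_eq : ∀ (arr : List Int),
    (PySem.List.pyRange 0 ((arr.length : Int) - 1) 2).map
        (fun i => PySem.List.pyGetD arr (i + 1) 0 - PySem.List.pyGetD arr i 0)
      = (altPairs arr).map (fun p => p.2 - p.1)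
  | [] => by
      rw [PySem.List.pyRange_of_pos 0 _ (by norm_num), if_neg (by simp)]
      simp [altPairs]
  | [x] => by
      rw [PySem.List.pyRange_of_pos 0 _ (by norm_num), if_neg (by simp)]
      simp [altPairs]
  | x :: y :: rest => by
      have ih := dist_eq rest
      have hb : (1 : Int) ≤ ((x :: y :: rest).length : Int) - 1 := by
        simp only [List.length_cons]
        push_cast
        omega
      rw [pyRange_two_cons _ hb]
      simp only [List.map_cons, List.map_map, altPairs]
      refine List.cons_eq_cons.mpr ⟨by norm_num [PySem.List.pyGetD_ofNat', List.getD], ?_⟩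
      · rw [show ((x :: y :: rest).length : Int) - 1 - 2 = ((rest.length : Int) - 1) by
            simp only [List.length_cons]; push_cast; ring]
        rw [← ih]
        apply List.map_congr_left
        intro i hi
        have hi0 : 0 ≤ i := by
          have h := (PySem.List.mem_pyRange_iff_of_pos (by norm_num) i).mp hi
          omega
        simp only [Function.comp_apply]
        rw [PySem.List.pyGetD_of_nonneg _ _ (show (0:Int) ≤ i + 2 + 1 by omega),
            PySem.List.pyGetD_of_nonneg _ _ (show (0:Int) ≤ i + 2 by omega),
            PySem.List.pyGetD_of_nonneg _ _ (show (0:Int) ≤ i + 1 by omega),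
            PySem.List.pyGetD_of_nonneg _ _ hi0]
        rw [show (i + 2 + 1).toNat = (i + 1).toNat + 2 by omega,
            show (i + 2).toNat = i.toNat + 2 by omega]
        simp [List.getD]

-- ===== VERDICT (by name: the statement is the Claim_ definition above) =====
theorem solution_spec : Claim_equal_solution := by
  intro input_array _ _
  unfold Spec_solution
  simp only [solution, solution_alt, PySem.List.foldl_append_singleton_eq_map, List.nil_append]
  rw [dist_eq, List.map_map]
  apply List.map_congr_left
  intro p _
  simp only [Function.comp_apply]
  exact year_eq _
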